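-- pv_equiv track=rewrite | github.com/Jinwoongma/Algorithm | test/line_2020/problem3.py | solution
-- ===== SOURCE A (Python) =====
-- def solution(road, n):
--     answer = -1
--     zero_cnt = 0
--     line_cnt = 0
--     temp = ''
--     MAX = 0
--     for i in range(len(road)):
--         if road[i] == '1':
--             temp += road[i]
--             line_cnt += 1
--         else:
--             if zero_cnt < n:
--                 zero_cnt += 1
--                 temp += road[i]
--             else:
--                 for j in range(len(temp)):
--                     if temp[j] == '0':
--                         temp = temp[j + 1:]
--                         break
--                 temp += road[i]
--         MAX = max(MAX, len(temp))
--     return MAX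
-- ===== SOURCE B (Python) =====
-- def solution(road, n):
--     # Two-pointer sliding window over indices: keep window start s, a queue of
--     # positions of '0' chars in the window, and the count of non-'1' chars seen
--     # in the free phase; O(len(road)) instead of A's repeated string slicing.
--     best = 0
--     start = 0
--     zeros = []          # positions of '0' in road[start:i+1], ascending
--     zhead = 0           # queue head index into zeros
--     free = 0            # non-'1' chars absorbed while free < n
--     for i, c in enumerate(road):
--         if c != '1':
--             if free < n:
--                 free += 1
--             else:
--                 if zhead < len(zeros):       # drop through first '0' in window
--                     start = zeros[zhead] + 1
--                     zhead += 1
--             if c == '0':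
--                 zeros.append(i)
--         if i - start + 1 > best:
--             best = i - start + 1
--     return best
-- ===== Notes on version B (the rewrite author's own statement) =====
-- stated objective: faster
-- what changed: Replaces A's materialized window string with repeated slicing and an inner scan for the first '0' by an index-based sliding window that keeps a queue of '0' positions, so each trim is O(1) instead of O(window).
import Mathlib
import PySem

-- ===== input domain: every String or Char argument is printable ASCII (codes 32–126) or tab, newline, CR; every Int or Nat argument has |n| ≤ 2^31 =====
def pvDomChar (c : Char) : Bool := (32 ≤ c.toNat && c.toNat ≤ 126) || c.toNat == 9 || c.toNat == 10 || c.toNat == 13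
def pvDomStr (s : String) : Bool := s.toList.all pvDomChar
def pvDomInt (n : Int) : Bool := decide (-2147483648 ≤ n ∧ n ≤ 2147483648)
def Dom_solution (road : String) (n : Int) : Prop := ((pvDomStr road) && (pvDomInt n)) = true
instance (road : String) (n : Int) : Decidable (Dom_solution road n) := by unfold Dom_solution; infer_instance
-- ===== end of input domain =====

-- B replaces A's window string (rebuilt by slicing, with an inner scan for the first '0')
-- by an O(L) index-based sliding window keeping a queue of '0' positions.

-- ===== PORT A =====
-- the inner loop "for j in range(len(temp)): if temp[j]=='0': temp = temp[j+1:]; break":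
-- scan for the first '0'; `some rest` = break taken with temp[j+1:] = rest, `none` = loop
-- finished without break (temp unchanged, handled by `.getD temp` at the call site)
def trimFind : List Char → Option (List Char)
  | [] => none
  | c :: rest => if c = '0' then some rest else trimFind rest

-- one iteration of A's main loop; state (zero_cnt, line_cnt, temp, MAX); road[i] is the char c
def stepA (n : Int) (s : Int × Int × List Char × Int) (c : Char) : Int × Int × List Char × Int :=
  let (zc, lc, temp, mx) := s
  let (zc', lc', temp') :=
    if c = '1' then (zc, lc + 1, temp ++ [c])
    else if zc < n then (zc + 1, lc, temp ++ [c])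
    else (zc, lc, ((trimFind temp).getD temp) ++ [c])
  (zc', lc', temp', max mx (PySem.List.len temp'))

-- answer = -1 in A is dead (never read); A returns MAX
def solution (road : String) (n : Int) : Int :=
  (road.toList.foldl (stepA n) (0, 0, ([] : List Char), 0)).2.2.2

-- ===== PORT B =====
-- one iteration of B's loop; state (best, start, zeros, zhead, free); input (c, i) from enumerate
def stepB (n : Int) (s : Int × Int × List Int × Nat × Int) (ci : Char × Nat) :
    Int × Int × List Int × Nat × Int :=
  let (best, start, zeros, zhead, free) := s
  let (c, i) := ci
  let (start', zeros', zhead', free') :=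
    if c ≠ '1' then
      let (start1, zhead1, free1) :=
        if free < n then (start, zhead, free + 1)
        else if zhead < zeros.length then (zeros.getD zhead 0 + 1, zhead + 1, free)
        else (start, zhead, free)
      (start1, (if c = '0' then zeros ++ [(i : Int)] else zeros), zhead1, free1)
    else (start, zeros, zhead, free)
  let L := (i : Int) - start' + 1
  ((if L > best then L else best), start', zeros', zhead', free')

def solution_alt (road : String) (n : Int) : Int :=
  (road.toList.zipIdx.foldl (stepB n) (0, 0, ([] : List Int), 0, 0)).1

-- ===== PRECONDITION & SPEC =====
def Spec_solution (road : String) (n : Int) (out : Int) : Prop := out = solution_alt road n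
instance (road : String) (n : Int) (out : Int) : Decidable (Spec_solution road n out) := by unfold Spec_solution; infer_instance

-- ===== CLAIM (what is proved, stated in full; the proofs are below) =====
def Claim_equal_solution : Prop := ∀ (road : String) (n : Int), Dom_solution road n → Spec_solution road n (solution road n)

-- ===== LEMMAS AND PROOFS =====

-- positions (as Ints, offset by `off`) of the '0' characters of a list
def zpos : List Char → Int → List Int
  | [], _ => []
  | c :: t, off => if c = '0' then off :: zpos t (off + 1) else zpos t (off + 1)

lemma zpos_append (t : List Char) (c : Char) (off : Int) :
    zpos (t ++ [c]) off = zpos t off ++ (if c = '0' then [off + t.length] else []) := by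
  induction t generalizing off with
  | nil => simp [zpos]
  | cons d t ih =>
      simp only [List.cons_append, zpos, ih, List.length_cons]
      have harith : off + 1 + (t.length : Int) = off + ((t.length : Int) + 1) := by ring
      split <;> simp [harith]

lemma trim_none (temp : List Char) (off : Int) (h : zpos temp off = []) :
    trimFind temp = none := by
  induction temp generalizing off with
  | nil => rfl
  | cons c t ih =>
      simp only [zpos] at h
      by_cases hc : c = '0'
      · simp [hc] at h
      · simp only [trimFind, if_neg hc]
        simp only [if_neg hc] at h
        exact ih (off + 1) h

lemma trim_cons (temp : List Char) (off p : Int) (ps : List Int)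
    (h : zpos temp off = p :: ps) :
    ∃ t', trimFind temp = some t' ∧ (t'.length : Int) = off + temp.length - (p + 1) ∧
      zpos t' (p + 1) = ps ∧ off ≤ p := by
  induction temp generalizing off with
  | nil => simp [zpos] at h
  | cons c t ih =>
      by_cases hc : c = '0'
      · simp only [zpos, if_pos hc] at h
        injection h with h1 h2
        subst h1; subst h2
        exact ⟨t, by simp [trimFind, hc], by push_cast [List.length_cons]; omega, rfl, le_refl _⟩
      · simp only [zpos, if_neg hc] at h
        obtain ⟨t', h1, h2, h3, h4⟩ := ih (off + 1) h
        exact ⟨t', by simp [trimFind, hc, h1], by push_cast [List.length_cons] at h2 ⊢; omega, h3, by omega⟩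

-- the coupling invariant between A's state and B's state after k characters
def CoupleInv (k : Nat) (a : Int × Int × List Char × Int) (b : Int × Int × List Int × Nat × Int) : Prop :=
  b.2.2.2.2 = a.1 ∧ b.1 = a.2.2.2 ∧ b.2.2.2.1 ≤ b.2.2.1.length ∧
  b.2.1 = (k : Int) - a.2.2.1.length ∧ a.2.2.1.length ≤ k ∧
  b.2.2.1.drop b.2.2.2.1 = zpos a.2.2.1 b.2.1

lemma step_inv (n : Int) (k : Nat) (c : Char) (a : Int × Int × List Char × Int)
    (b : Int × Int × List Int × Nat × Int) (h : CoupleInv k a b) :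
    CoupleInv (k + 1) (stepA n a c) (stepB n b (c, k)) := by
  obtain ⟨zc, lc, temp, mx⟩ := a
  obtain ⟨best, start, zeros, zhead, free⟩ := b
  obtain ⟨hfree, hbest, hzh, hstart, hlen, hz⟩ := h
  simp only [CoupleInv] at *
  by_cases hc1 : c = '1'
  · -- branch road[i] == '1'
    have hc0 : c ≠ '0' := by subst hc1; decide
    simp only [stepA, stepB, if_pos hc1, if_neg (by simp [hc1] : ¬ c ≠ '1'),
      PySem.List.len_eq, zpos_append, hc0]
    refine ⟨hfree, ?_, hzh, by push_cast [List.length_append, List.length_cons, List.length_nil]; omega, by simp only [List.length_append, List.length_cons, List.length_nil]; omega, by simp [hz]⟩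
    · push_cast [List.length_append, List.length_cons, List.length_nil]
      rw [hbest, hstart]
      split <;> omega
  · by_cases hfn : zc < n
    · -- branch zero_cnt < n : absorb the char
      simp only [stepA, stepB, if_neg hc1, if_pos (by simp [hc1] : c ≠ '1'),
        hfree, if_pos hfn, PySem.List.len_eq, zpos_append]
      refine ⟨trivial, ?_, ?_, by push_cast [List.length_append, List.length_cons, List.length_nil]; omega, by simp only [List.length_append, List.length_cons, List.length_nil]; omega, ?_⟩
      · push_cast [List.length_append, List.length_cons, List.length_nil]
        rw [hbest, hstart]
        split <;> omega
      · exact le_trans hzh (by split <;> simp)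
      · split
        · rw [List.drop_append_of_le_length hzh, hz, hstart]
          congr 2; omega
        · rw [hz]; simp
    · -- trim branch
      rcases hzero : zpos temp start with _ | ⟨p, ps⟩
      · -- window contains no '0': temp unchanged, B's queue is empty
        have hdrop : zeros.drop zhead = [] := by rw [hz, hzero]
        have hguard : ¬ zhead < zeros.length := by
          have := List.drop_eq_nil_iff.mp hdrop; omega
        have htf : trimFind temp = none := trim_none temp start hzero
        simp only [stepA, stepB, if_neg hc1, if_pos (by simp [hc1] : c ≠ '1'),
          hfree, if_neg hfn, if_neg hguard, htf, Option.getD_none,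
          PySem.List.len_eq, zpos_append]
        refine ⟨trivial, ?_, ?_, by push_cast [List.length_append, List.length_cons, List.length_nil]; omega, by simp only [List.length_append, List.length_cons, List.length_nil]; omega, ?_⟩
        · push_cast [List.length_append, List.length_cons, List.length_nil]
          rw [hbest, hstart]
          split <;> omega
        · exact le_trans hzh (by split <;> simp)
        · split
          · rw [List.drop_append_of_le_length hzh, hz, hzero, hstart]
            congr 2; omega
          · simp [hz, hzero]
      · -- drop the window through its first '0' (at position p)
        obtain ⟨t', htf, htl, htz, hop⟩ := trim_cons temp start p ps hzero
        have hdrop : zeros.drop zhead = p :: ps := by rw [hz, hzero]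
        have hguard : zhead < zeros.length := by
          by_contra hle
          rw [List.drop_eq_nil_iff.mpr (by omega)] at hdrop
          simp at hdrop
        have hgetd : zeros.getD zhead 0 = p := by
          have h0 : zeros[zhead]? = some p := by
            have h1 : (zeros.drop zhead)[0]? = zeros[zhead + 0]? := List.getElem?_drop
            rw [hdrop] at h1
            simpa using h1.symm
          simp [List.getD, h0]
        have hdrop1 : zeros.drop (zhead + 1) = ps := by
          have h1 : (zeros.drop zhead).drop 1 = zeros.drop (zhead + 1) := List.drop_drop
          rw [← h1, hdrop]
          rfl
        have hplo : 0 ≤ p := by omega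
        have hphi : p < (k : Int) := by omega
        simp only [stepA, stepB, if_neg hc1, if_pos (by simp [hc1] : c ≠ '1'),
          hfree, if_neg hfn, if_pos hguard, htf, Option.getD_some, hgetd,
          PySem.List.len_eq, zpos_append]
        refine ⟨trivial, ?_, ?_, by push_cast [List.length_append, List.length_cons, List.length_nil] at htl ⊢; omega, by simp only [List.length_append, List.length_cons, List.length_nil]; omega, ?_⟩
        · push_cast [List.length_append, List.length_cons, List.length_nil]
          rw [hbest]
          split <;> omega
        · exact le_trans hguard (by split <;> simp)
        · split
          · rw [List.drop_append_of_le_length (by omega), hdrop1, htz]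
            congr 2; omega
          · simp [hdrop1, htz]

lemma fold_inv (n : Int) (rest : List Char) (k : Nat) (a : Int × Int × List Char × Int)
    (b : Int × Int × List Int × Nat × Int) (h : CoupleInv k a b) :
    CoupleInv (k + rest.length) (rest.foldl (stepA n) a) ((rest.zipIdx k).foldl (stepB n) b) := by
  induction rest generalizing k a b with
  | nil => simpa using h
  | cons c t ih =>
      have := ih (k + 1) (stepA n a c) (stepB n b (c, k)) (step_inv n k c a b h)
      simpa [List.zipIdx_cons, Nat.add_comm, Nat.add_assoc, Nat.add_left_comm] using this

-- ===== VERDICT (by name: the statement is the Claim_ definition above) =====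
theorem solution_spec : Claim_equal_solution := by
  intro road n _
  unfold Spec_solution solution solution_alt
  have h0 : CoupleInv 0 (0, 0, ([] : List Char), 0) (0, 0, ([] : List Int), 0, 0) := by
    simp [CoupleInv, zpos]
  have := fold_inv n road.toList 0 _ _ h0
  rw [show road.toList.zipIdx = road.toList.zipIdx 0 from rfl] at this
  exact (this.2.1).symm
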